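-- pv_equiv track=rewrite | github.com/ChanWooKim-NLP/PythonPractice | 프로그래머스/unrated/142085. 디펜스 게임/디펜스 게임.py | solution
-- ===== SOURCE A (Python) =====
-- import heapq
--
-- def solution(n, k, enemy):
--     # 힙 자료구조를 통해 최대 힙 구현
--     # 힙에 추가 : 라운드 진행 의미
--     # 라운드를 진행하며 적의 수를 total_enemy에 추가해줌
--     # 적의 수가 내가 가진 n보다 많을 경우 k를 소모하고 진행한 라운드에서 pop한 후 answer 추가
--     # 내가 가진 병사가 많을 경우 answer 추가
--     heap = []
--     answer = 0
--     total_enemy = 0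
--
--     for e in enemy:
--         heapq.heappush(heap, -e)
--         total_enemy += e
--
--         if total_enemy > n:
--             if k == 0:
--                 break
--             k -= 1
--             total_enemy += heapq.heappop(heap)
--
--         answer += 1
--
--     return answer
-- ===== SOURCE B (Python) =====
-- import heapq
--
-- def solution(n, k, enemy):
--     free = []          # min-heap of the waves currently skipped for free (the k largest so far)
--     paid = 0           # soldiers spent on every other wave
--     for i, e in enumerate(enemy):
--         heapq.heappush(free, e)
--         if len(free) > k:
--             paid += heapq.heappop(free)
--         if paid > n:
--             return i
--     return len(enemy)
-- ===== Notes on version B (the rewrite author's own statement) =====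
-- stated objective: alternative
-- what changed: B keeps a size-k min-heap of the waves currently skipped for free and accumulates the cost of each evicted wave into a paid total, instead of A's scheme of paying every wave into a running total and refunding the largest wave seen whenever the total overflows the budget.
-- outside the precondition, e.g. on solution(-1, 1, [-3]): A returns 1, B returns 0; on solution(0, -1, [1]): A returns 1, B returns 0
import Mathlib
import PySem

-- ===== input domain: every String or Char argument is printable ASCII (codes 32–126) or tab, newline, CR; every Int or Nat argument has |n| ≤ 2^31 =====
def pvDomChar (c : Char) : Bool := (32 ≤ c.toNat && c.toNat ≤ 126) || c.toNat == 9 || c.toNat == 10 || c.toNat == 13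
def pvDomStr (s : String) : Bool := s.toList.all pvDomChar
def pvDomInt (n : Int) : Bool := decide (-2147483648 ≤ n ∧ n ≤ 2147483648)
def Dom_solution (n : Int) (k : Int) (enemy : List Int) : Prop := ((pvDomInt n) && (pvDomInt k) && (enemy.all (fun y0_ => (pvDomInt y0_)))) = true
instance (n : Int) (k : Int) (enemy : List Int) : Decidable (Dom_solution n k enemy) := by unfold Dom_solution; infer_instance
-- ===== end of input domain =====

-- B replaces A's pay-then-refund max-heap greedy by a size-k min-heap of the free (skipped)
-- waves, paying for each evicted wave; proved equal to A on Pre_solution (the puzzle's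
-- natural domain plus the sign-mixed regions where the two strategies provably coincide).


-- ===== PORT A =====
-- Model of the heapq min-heap, shared by both ports: a sorted list. Exact with respect to
-- every value the Python observes (heappop returns the minimum; the internal array order
-- of heapq is never observed by either program).
def heapPush (h : List Int) (x : Int) : List Int := List.orderedInsert (· ≤ ·) x h
-- heappop: returns the minimum and the rest. heapq.heappop raises IndexError on [];
-- both callers pop right after a push, so the [] branch is unreachable.
def heapPop : List Int → Int × List Int
  | [] => (0, [])
  | x :: t => (x, t)

def solutionGo (n : Int) : List Int → Int → Int → Int → List Int → Int
  | _heap, answer, _total, _k, [] => answer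
  | heap, answer, total, k, e :: rest =>
      let heap1 := heapPush heap (-e)
      let total1 := total + e
      if total1 > n then
        if k = 0 then answer
        else
          let p := heapPop heap1
          solutionGo n p.2 (answer + 1) (total1 + p.1) (k - 1) rest
      else solutionGo n heap1 (answer + 1) total1 k rest

def solution (n : Int) (k : Int) (enemy : List Int) : Int :=
  solutionGo n [] 0 0 k enemy

-- ===== PORT B =====
def solutionAltGo (n : Int) (k : Int) : List Int → Int → Int → List Int → Int
  | _free, _paid, i, [] => i
  | free, paid, i, e :: rest =>
      let free1 := heapPush free e
      let st := if (free1.length : Int) > k then ((heapPop free1).2, paid + (heapPop free1).1)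
                else (free1, paid)
      if st.2 > n then i else solutionAltGo n k st.1 st.2 (i + 1) rest

def solution_alt (n : Int) (k : Int) (enemy : List Int) : Int :=
  solutionAltGo n k [] 0 0 enemy

-- ===== PRECONDITION & SPEC =====
-- Pre_ admits the problem's natural domain (nonnegative n, k and enemy counts) plus the
-- sign-mixed regions where the two strategies provably coincide (k = 0; at most k strictly
-- positive waves; no prefix sum ever exceeding n); the remaining inputs (negative budgets
-- or mixed-sign waves that force a refund) are an unspecified corner outside the puzzle's
-- domain on which A's lazy-refund order and B's eager top-k choice legitimately disagree.
def Pre_solution (n : Int) (k : Int) (enemy : List Int) : Prop :=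
  enemy = [] ∨ k = 0 ∨
  (k < 0 ∧ ∀ p ∈ List.range (enemy.length + 1), (enemy.take p).sum ≤ n) ∨
  (0 ≤ n ∧ 0 ≤ k ∧
    ((∀ e ∈ enemy, 0 ≤ e) ∨
     ((enemy.countP (fun x => decide (0 < x)) : Int) ≤ k) ∨
     (∀ p ∈ List.range (enemy.length + 1), (enemy.take p).sum ≤ n)))
instance (n : Int) (k : Int) (enemy : List Int) : Decidable (Pre_solution n k enemy) := by
  unfold Pre_solution; infer_instance

def pvWitness_solution : Int × Int × List Int := (10, 1, [4, 5, 6, 7])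

def Spec_solution (n : Int) (k : Int) (enemy : List Int) (out : Int) : Prop := out = solution_alt n k enemy
instance (n : Int) (k : Int) (enemy : List Int) (out : Int) : Decidable (Spec_solution n k enemy out) := by unfold Spec_solution; infer_instance

-- ===== CLAIM (what is proved, stated in full; the proofs are below) =====
def Claim_equal_solution : Prop := ∀ (n : Int) (k : Int) (enemy : List Int), Dom_solution n k enemy → Pre_solution n k enemy → Spec_solution n k enemy (solution n k enemy)

-- ===== LEMMAS AND PROOFS =====

-- A's heap holds the negated kept waves; `negRev K` is that heap when the kept waves,
-- sorted ascending, are `K`.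
def negRev (xs : List Int) : List Int := (xs.map (fun x => -x)).reverse

-- local name for ordered insertion into an ascending list
def insI (e : Int) (xs : List Int) : List Int := List.orderedInsert (· ≤ ·) e xs

theorem heapPush_insI (h : List Int) (x : Int) : heapPush h x = insI x h := rfl

theorem perm_insI (e : Int) (xs : List Int) : List.Perm (insI e xs) (e :: xs) :=
  List.perm_orderedInsert _ _ _

theorem sum_insI (e : Int) (xs : List Int) : (insI e xs).sum = e + xs.sum := by
  rw [(perm_insI e xs).sum_eq]; simp

theorem length_insI (e : Int) (xs : List Int) : (insI e xs).length = xs.length + 1 :=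
  List.orderedInsert_length _ _ _

theorem mem_insI {x e : Int} {xs : List Int} : x ∈ insI e xs ↔ x = e ∨ x ∈ xs :=
  List.mem_orderedInsert _

theorem pw_insI {e : Int} {xs : List Int} (h : xs.Pairwise (· ≤ ·)) :
    (insI e xs).Pairwise (· ≤ ·) := List.Pairwise.orderedInsert _ _ h

theorem sorted_eqI {l1 l2 : List Int} (h1 : l1.Pairwise (· ≤ ·)) (h2 : l2.Pairwise (· ≤ ·))
    (hp : List.Perm l1 l2) : l1 = l2 := hp.eq_of_pairwise' h1 h2

theorem insI_append_ge (e : Int) (P Q : List Int) (h : ∀ x ∈ Q, e ≤ x) :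
    insI e (P ++ Q) = insI e P ++ Q := by
  induction P with
  | nil =>
    cases Q with
    | nil => rfl
    | cons q t => simp [insI, List.orderedInsert, h q (by simp)]
  | cons b P ih =>
    simp only [List.cons_append, insI, List.orderedInsert] at *
    by_cases hb : e ≤ b <;> simp [hb, ih]

theorem insI_append_lt (e : Int) (P Q : List Int) (h : ∀ x ∈ P, ¬ e ≤ x) :
    insI e (P ++ Q) = P ++ insI e Q := by
  induction P with
  | nil => rfl
  | cons b P ih =>
    simp only [List.cons_append, insI, List.orderedInsert] at *
    simp [h b (by simp), ih (fun x hx => h x (List.mem_cons_of_mem _ hx))]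

theorem insI_big (e : Int) (P : List Int) (h : ∀ x ∈ P, ¬ e ≤ x) :
    insI e P = P ++ [e] := by
  simpa using insI_append_lt e P [] h

theorem negRev_pw {xs : List Int} (h : xs.Pairwise (· ≤ ·)) :
    (negRev xs).Pairwise (· ≤ ·) := by
  simp only [negRev, List.pairwise_reverse, List.pairwise_map]
  exact h.imp (by intro a b hab; simpa using hab)

theorem push_negRev (e : Int) (xs : List Int) (h : xs.Pairwise (· ≤ ·)) :
    heapPush (negRev xs) (-e) = negRev (insI e xs) := by
  apply sorted_eqI
  · exact pw_insI (negRev_pw h)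
  · exact negRev_pw (pw_insI h)
  · refine (List.perm_orderedInsert _ _ _).trans ?_
    refine (((List.reverse_perm _).cons (-e)).trans ?_).trans (List.reverse_perm _).symm
    show List.Perm ((e :: xs).map (fun x => -x)) _
    exact ((perm_insI e xs).map _).symm

theorem pop_negRev (xs : List Int) (l : Int) :
    heapPop (negRev (xs ++ [l])) = (-l, negRev xs) := by
  simp [negRev, heapPop]

theorem sum_nonnegI {l : List Int} (h : ∀ x ∈ l, 0 ≤ x) : 0 ≤ l.sum :=
  List.sum_nonneg h

theorem perm_ins_mid (e : Int) (X Y : List Int) :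
    List.Perm (insI e (X ++ Y)) (X ++ insI e Y) :=
  (perm_insI _ _).trans (List.perm_middle.symm.trans (List.Perm.append_left X (perm_insI e Y).symm))

theorem heapPop_cons (x : Int) (t : List Int) : heapPop (x :: t) = (x, t) := rfl

theorem key_lemma (n k : Int) (hn : 0 ≤ n) :
  ∀ (rest : List Int), (∀ e ∈ rest, 0 ≤ e) →
  ∀ (S L R : List Int) (kA ans : Int),
   (S ++ L ++ R).Pairwise (· ≤ ·) →
   (∀ x ∈ S ++ L ++ R, 0 ≤ x) →
   0 ≤ kA →
   kA + (R.length : Int) = k →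
   (L.length : Int) ≤ kA →
   ((L.length : Int) < kA → S = []) →
   (S ++ L).sum ≤ n →
   (∀ r0 rs, R = r0 :: rs → n < (S ++ L).sum + r0) →
   solutionGo n (negRev (S ++ L)) ans (S ++ L).sum kA rest
     = solutionAltGo n k (L ++ R) S.sum ans rest := by
  intro rest
  induction rest with
  | nil =>
    intro _ S L R kA ans _ _ _ _ _ _ _ _
    simp [solutionGo, solutionAltGo]
  | cons e rest ih =>
    intro hrest S L R kA ans hpw hpos hkA hkR hL hP7 htot h6
    have he0 : 0 ≤ e := hrest e (by simp)
    have hrest' : ∀ x ∈ rest, 0 ≤ x := fun x hx => hrest x (List.mem_cons_of_mem _ hx)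
    have hpwSL : (S ++ L).Pairwise (· ≤ ·) := by
      have h' : ((S ++ L) ++ R).Pairwise (· ≤ ·) := by simpa [List.append_assoc] using hpw
      exact h'.sublist (List.sublist_append_left _ _)
    have hsumL : 0 ≤ L.sum := sum_nonnegI (fun x hx => hpos x (by simp [hx]))
    have hsumS : 0 ≤ S.sum := sum_nonnegI (fun x hx => hpos x (by simp [hx]))
    simp only [solutionGo, solutionAltGo]
    rw [push_negRev e (S ++ L) hpwSL, heapPush_insI]
    by_cases hov : (S ++ L).sum + e > n
    · rw [if_pos hov]
      by_cases hk0 : kA = 0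
      · -- A dies; show B dies too, both return ans
        rw [if_pos hk0]
        have hL0 : L = [] := by
          cases L with
          | nil => rfl
          | cons a t => exfalso; simp at hL; omega
        subst hL0
        have hcond : ((insI e ([] ++ R)).length : Int) > k := by
          simp [length_insI]; omega
        rw [if_pos hcond]
        have hpop : S.sum + (heapPop (insI e ([] ++ R))).1 > n := by
          cases R with
          | nil =>
            simp only [List.nil_append, insI, List.orderedInsert, heapPop]
            simpa using hov
          | cons r0 rs =>
            by_cases her : e ≤ r0
            · simp only [List.nil_append, insI, List.orderedInsert, if_pos her, heapPop]
              simpa using hov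
            · simp only [List.nil_append, insI, List.orderedInsert, if_neg her, heapPop]
              have := h6 r0 rs rfl
              simp at this; omega
        rw [if_pos hpop]
      · -- A removes its largest kept wave
        rw [if_neg hk0]
        have hkA1 : 1 ≤ kA := by omega
        by_cases hLk : (L.length : Int) < kA
        · -- strictly fewer than kA free slots used: S = [], B does not evict
          have hS : S = [] := hP7 hLk
          subst hS
          simp only [List.nil_append] at *
          have hcond : ¬ (((insI e (L ++ R)).length : Int) > k) := by
            simp [length_insI]; omega
          rw [if_neg hcond]
          have hnd : ¬ ((List.sum ([] : List Int)) > n) := by simp; omega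
          rw [if_neg (by simpa using hnd)]
          rcases List.eq_nil_or_concat' L with rfl | ⟨Lf, lN, rfl⟩
          · -- L = []
            have h1 : insI e ([] : List Int) = [] ++ [e] := rfl
            rw [h1, pop_negRev]
            have h2 : insI e R = [] ++ ([] ++ insI e R) := by simp
            rw [show (List.sum ([] : List Int) + e + -e) = (([] : List Int) ++ ([] : List Int)).sum by simp]
            rw [show insI e (([] : List Int) ++ R) = ([] : List Int) ++ insI e R by simp]
            rw [show (List.sum ([] : List Int)) = (([] : List Int)).sum by simp]
            refine ih hrest' [] [] (insI e R) (kA - 1) (ans + 1) ?_ ?_ (by omega) ?_ (by simp; omega) (by simp) (by simpa using hn) ?_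
            · simpa using pw_insI (by simpa using hpw : R.Pairwise (· ≤ ·))
            · intro x hx
              simp only [List.nil_append, mem_insI] at hx
              rcases hx with rfl | hx
              · exact he0
              · exact hpos x (by simp [hx])
            · simp [length_insI]; omega
            · intro r0 rs hr
              cases R with
              | nil =>
                simp only [insI, List.orderedInsert] at hr
                cases hr; simpa using hov
              | cons r0' rs' =>
                by_cases her : e ≤ r0'
                · rw [show insI e (r0'::rs') = e :: r0' :: rs' from if_pos her] at hr
                  obtain ⟨h1, rfl⟩ := List.cons.injEq .. |>.mp hr
                  subst h1
                  simpa using hov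
                · rw [show insI e (r0'::rs') = r0' :: insI e rs' from if_neg her] at hr
                  obtain ⟨h1, rfl⟩ := List.cons.injEq .. |>.mp hr
                  subst h1
                  have := h6 r0' rs' rfl
                  simp at this ⊢; omega
          · -- L = Lf ++ [lN]
            have hpwL : (Lf ++ [lN]).Pairwise (· ≤ ·) := by
              simpa using hpwSL
            have hLfN : ∀ x ∈ Lf, x ≤ lN := by
              intro x hx
              have := List.pairwise_append.mp hpwL
              exact this.2.2 x hx lN (by simp)
            have hLR : ∀ x ∈ Lf ++ [lN], ∀ y ∈ R, x ≤ y := by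
              intro x hx y hy
              exact (List.pairwise_append.mp hpw).2.2 x hx y hy
            have hpwR : R.Pairwise (· ≤ ·) := (List.pairwise_append.mp hpw).2.1
            by_cases helN : e ≤ lN
            · -- removed wave is lN
              rw [show insI e (Lf ++ [lN]) = insI e Lf ++ [lN] from
                insI_append_ge e Lf [lN] (by simpa using helN), pop_negRev]
              have heR : ∀ x ∈ lN :: R, e ≤ x := by
                intro x hx
                rcases List.mem_cons.mp hx with rfl | hx
                · exact helN
                · exact le_trans helN (hLR lN (by simp) x hx)
              rw [show (Lf ++ [lN]).sum + e + -lN = (([] : List Int) ++ insI e Lf).sum by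
                simp [sum_insI]; ring]
              rw [show insI e ((Lf ++ [lN]) ++ R) = insI e Lf ++ (lN :: R) by
                rw [List.append_assoc]
                exact insI_append_ge e Lf ([lN] ++ R) (by simpa using heR)]
              rw [show insI e Lf ++ (lN :: R) = insI e Lf ++ (lN :: R) from rfl]
              rw [show (List.sum ([] : List Int)) = (([] : List Int)).sum from rfl]
              have := ih hrest' [] (insI e Lf) (lN :: R) (kA - 1) (ans + 1) ?_ ?_ (by omega) ?_ ?_ (by simp) ?_ ?_
              · simpa using this
              · -- pairwise
                simp only [List.nil_append]
                refine List.pairwise_append.mpr ⟨pw_insI (List.pairwise_append.mp hpwL).1, ?_, ?_⟩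
                · refine List.pairwise_cons.mpr ⟨?_, hpwR⟩
                  intro y hy; exact hLR lN (by simp) y hy
                · intro x hx y hy
                  rcases mem_insI.mp hx with rfl | hx
                  · exact heR y hy
                  · rcases List.mem_cons.mp hy with rfl | hy
                    · exact hLfN x hx
                    · exact hLR x (by simp [hx]) y hy
              · intro x hx
                simp only [List.nil_append, List.mem_append, mem_insI, List.mem_cons] at hx
                rcases hx with (rfl | hx) | rfl | hx
                · exact he0
                · exact hpos x (by simp [hx])
                · exact hpos x (by simp)
                · exact hpos x (by simp [hx])
              · simp [length_insI]; omega
              · simp [length_insI]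
                have : (Lf.length : Int) + 1 < kA := by
                  simpa using hLk
                omega
              · simp [sum_insI]
                have : Lf.sum + lN ≤ n := by simpa using htot
                have : e ≤ lN := helN
                omega
              · intro r0 rs hr
                cases hr
                simp [sum_insI] at hov ⊢
                omega
            · -- e is larger than every kept wave: e itself is removed
              have hbig : ∀ x ∈ Lf ++ [lN], ¬ e ≤ x := by
                intro x hx hex
                rcases List.mem_append.mp hx with hx | hx
                · exact helN (le_trans hex (hLfN x hx))
                · simp at hx; subst hx; exact helN hex
              rw [insI_big e (Lf ++ [lN]) hbig, pop_negRev]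
              rw [show (Lf ++ [lN]).sum + e + -e = (([] : List Int) ++ (Lf ++ [lN])).sum by simp]
              rw [show insI e ((Lf ++ [lN]) ++ R) = (Lf ++ [lN]) ++ ([] ++ insI e R) by
                simpa using insI_append_lt e (Lf ++ [lN]) R hbig]
              rw [show (List.sum ([] : List Int)) = (([] : List Int)).sum from rfl]
              have heLf : ∀ x ∈ Lf ++ [lN], x ≤ e := by
                intro x hx; exact le_of_not_ge (fun hc => hbig x hx hc)
              refine ih hrest' [] (Lf ++ [lN]) (insI e R) (kA - 1) (ans + 1) ?_ ?_ (by omega)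
                ?_ ?_ (by simp) (by simpa using htot) ?_
              · simp only [List.nil_append]
                refine List.pairwise_append.mpr ⟨hpwL, pw_insI hpwR, ?_⟩
                intro x hx y hy
                rcases mem_insI.mp hy with rfl | hy
                · exact heLf x hx
                · exact hLR x hx y hy
              · intro x hx
                simp only [List.nil_append, List.mem_append, mem_insI] at hx
                rcases hx with hx | rfl | hx
                · exact hpos x (by simp only [List.mem_append] at hx ⊢; tauto)
                · exact he0
                · exact hpos x (by simp [hx])
              · simp [length_insI]; omega
              · have := hLk; simp at this ⊢; omega
              · intro r0 rs hr
                cases R with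
                | nil =>
                  rw [show insI e ([] : List Int) = [e] from rfl] at hr
                  obtain ⟨h1, rfl⟩ := List.cons.injEq .. |>.mp hr
                  subst h1
                  simp at hov ⊢; omega
                | cons r0' rs' =>
                  by_cases her : e ≤ r0'
                  · rw [show insI e (r0'::rs') = e :: r0' :: rs' from if_pos her] at hr
                    obtain ⟨h1, rfl⟩ := List.cons.injEq .. |>.mp hr
                    subst h1
                    simp at hov ⊢; omega
                  · rw [show insI e (r0'::rs') = r0' :: insI e rs' from if_neg her] at hr
                    obtain ⟨h1, rfl⟩ := List.cons.injEq .. |>.mp hr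
                    subst h1
                    have := h6 r0' rs' rfl
                    simp at this ⊢; omega
        · -- all kA free slots used by L: B evicts
          have hLeq : (L.length : Int) = kA := le_antisymm hL (not_lt.mp hLk)
          have hcond : ((insI e (L ++ R)).length : Int) > k := by
            simp [length_insI]; omega
          rw [if_pos hcond]
          obtain ⟨pwSL', pwR, crossSLR⟩ := List.pairwise_append.mp hpw
          obtain ⟨pwS, pwL, crossS⟩ := List.pairwise_append.mp pwSL'
          have crossLR : ∀ x ∈ L, ∀ y ∈ R, x ≤ y := fun x hx y hy =>
            crossSLR x (by simp [hx]) y hy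
          cases L with
          | nil => exfalso; simp at hLeq; omega
          | cons l0 lt =>
            obtain ⟨hl0, pwlt⟩ := List.pairwise_cons.mp pwL
            have hsumlt : 0 ≤ lt.sum :=
              sum_nonnegI (fun x hx => hpos x (by simp [hx]))
            have htot' : S.sum + (l0 + lt.sum) ≤ n := by simpa using htot
            by_cases hel0 : e ≤ l0
            · -- the newly pushed wave e is evicted by B; A removes its largest kept wave
              have hfree : insI e ((l0 :: lt) ++ R) = e :: (l0 :: (lt ++ R)) := by
                simp [insI, List.orderedInsert, hel0]
              rw [hfree]
              simp only [heapPop_cons]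
              rw [if_neg (by omega : ¬ (S.sum + e > n))]
              rcases List.eq_nil_or_concat' lt with rfl | ⟨mid, lN, rfl⟩
              · -- single used slot: L = [l0]
                rw [show insI e (S ++ [l0]) = insI e S ++ [l0] from
                  insI_append_ge e S [l0] (by simpa using hel0), pop_negRev]
                have H := ih hrest' (insI e S) [] (l0 :: R) (kA - 1) (ans + 1) ?_ ?_ (by omega)
                  (by simp at hkR ⊢; omega) (by simp; omega) ?_ ?_ ?_
                · simp only [List.append_nil, List.nil_append] at H
                  rw [show (S ++ [l0]).sum + e + -l0 = (insI e S).sum by simp [sum_insI]; ring]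
                  rw [show S.sum + e = (insI e S).sum by rw [sum_insI]; ring]
                  simp only [List.nil_append]
                  exact H
                · simp only [List.append_nil, List.nil_append]
                  refine List.pairwise_append.mpr ⟨pw_insI pwS, ?_, ?_⟩
                  · exact List.pairwise_cons.mpr ⟨fun y hy => crossLR l0 (by simp) y hy, pwR⟩
                  intro x hx y hy
                  simp only [List.mem_cons] at hy
                  rcases mem_insI.mp hx with rfl | hx
                  · rcases hy with hy | hy
                    · rw [hy]; exact hel0
                    · exact le_trans hel0 (crossLR l0 (by simp) y hy)
                  · rcases hy with hy | hy
                    · rw [hy]; exact crossS x hx l0 (by simp)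
                    · exact crossSLR x (by simp [hx]) y hy
                · intro x hx
                  simp only [List.append_nil, List.nil_append, List.mem_append, mem_insI,
                    List.mem_cons] at hx
                  rcases hx with (rfl | hx) | rfl | hx
                  · exact he0
                  · exact hpos x (by simp [hx])
                  · exact hpos x (by simp)
                  · exact hpos x (by simp [hx])
                · intro h
                  exfalso; simp at hLeq; omega
                · simp only [List.append_nil, sum_insI]; omega
                · intro r0 rs hr
                  obtain ⟨h1, rfl⟩ := List.cons.injEq .. |>.mp hr
                  subst h1
                  simp [sum_insI] at hov ⊢; omega
              · -- L = l0 :: mid ++ [lN]; lN is removed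
                have hmidN : ∀ x ∈ l0 :: mid, x ≤ lN := by
                  intro x hx
                  rcases List.mem_cons.mp hx with rfl | hx
                  · exact hl0 lN (by simp)
                  · exact (List.pairwise_append.mp pwlt).2.2 x hx lN (by simp)
                have helN : e ≤ lN := le_trans hel0 (hmidN l0 (by simp))
                rw [show S ++ l0 :: (mid ++ [lN]) = (S ++ l0 :: mid) ++ [lN] by simp]
                rw [show insI e ((S ++ l0 :: mid) ++ [lN]) = insI e (S ++ l0 :: mid) ++ [lN] from
                  insI_append_ge e _ [lN] (by simpa using helN), pop_negRev]
                rw [show insI e (S ++ l0 :: mid) = insI e S ++ (l0 :: mid) from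
                  insI_append_ge e S (l0 :: mid) (by
                    intro x hx
                    rcases List.mem_cons.mp hx with rfl | hx
                    · exact hel0
                    · exact le_trans hel0 (hl0 x (by simp [hx])))]
                have hLRy : ∀ y ∈ lN :: R, ∀ x ∈ l0 :: mid, x ≤ y := by
                  intro y hy x hx
                  rcases List.mem_cons.mp hy with rfl | hy
                  · exact hmidN x hx
                  · exact crossLR x (by
                      rcases List.mem_cons.mp hx with rfl | hx
                      · simp
                      · simp [hx]) y hy
                have H := ih hrest' (insI e S) (l0 :: mid) (lN :: R) (kA - 1) (ans + 1) ?_ ?_ (by omega)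
                  (by simp at hkR ⊢; omega) (by simp at hLeq ⊢; omega) (by intro h; exfalso; simp at hLeq h; omega) ?_ ?_
                · rw [show ((S ++ l0 :: mid) ++ [lN]).sum + e + -lN = (insI e S ++ (l0 :: mid)).sum by
                    simp [sum_insI]; ring]
                  rw [show l0 :: ((mid ++ [lN]) ++ R) = (l0 :: mid) ++ (lN :: R) by simp]
                  rw [show S.sum + e = (insI e S).sum by rw [sum_insI]; ring]
                  exact H
                · refine List.pairwise_append.mpr ⟨List.pairwise_append.mpr ⟨pw_insI pwS, ?_, ?_⟩, ?_, ?_⟩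
                  · exact List.pairwise_cons.mpr ⟨fun y hy => hl0 y (by simp [hy]),
                      (List.pairwise_append.mp pwlt).1⟩
                  · intro x hx y hy
                    rcases mem_insI.mp hx with rfl | hx
                    · rcases List.mem_cons.mp hy with hy | hy
                      · rw [hy]; exact hel0
                      · exact le_trans hel0 (hl0 y (by simp [hy]))
                    · rcases List.mem_cons.mp hy with hy | hy
                      · rw [hy]; exact crossS x hx l0 (by simp)
                      · exact crossS x hx y (by simp [hy])
                  · exact List.pairwise_cons.mpr ⟨fun y hy => crossLR lN (by simp) y hy, pwR⟩
                  · intro x hx y hy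
                    rcases List.mem_append.mp hx with hx | hx
                    · rcases mem_insI.mp hx with rfl | hx
                      · rcases List.mem_cons.mp hy with hy | hy
                        · rw [hy]; exact helN
                        · exact le_trans helN (crossLR lN (by simp) y hy)
                      · rcases List.mem_cons.mp hy with hy | hy
                        · rw [hy]; exact crossS x hx lN (by simp)
                        · exact crossSLR x (by simp [hx]) y hy
                    · exact hLRy y hy x hx
                · intro x hx
                  simp only [List.mem_append, mem_insI, List.mem_cons] at hx
                  rcases hx with (((rfl | hx) | hx) | hx) | hx
                  · exact he0
                  all_goals apply hpos x
                  all_goals simp only [List.mem_append, List.mem_cons]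
                  all_goals tauto
                · simp [sum_insI] at htot' ⊢; omega
                · intro r0 rs hr
                  obtain ⟨h1, rfl⟩ := List.cons.injEq .. |>.mp hr
                  subst h1
                  simp [sum_insI] at hov ⊢; omega
            · -- the head free wave l0 is evicted and paid; A removes its largest kept wave
              have hfree : insI e ((l0 :: lt) ++ R) = l0 :: insI e (lt ++ R) := by
                simp [insI, hel0]
              rw [hfree]
              simp only [heapPop_cons]
              rw [if_neg (by omega : ¬ (S.sum + l0 > n))]
              have hSle : ∀ x ∈ S, x ≤ l0 := fun x hx => crossS x hx l0 (by simp)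
              by_cases hbigL : ∀ x ∈ l0 :: lt, ¬ e ≤ x
              · -- e is the largest wave seen: A removes e itself
                have hbigSL : ∀ x ∈ S ++ l0 :: lt, ¬ e ≤ x := by
                  intro x hx hex
                  rcases List.mem_append.mp hx with hx | hx
                  · exact hel0 (le_trans hex (hSle x hx))
                  · exact hbigL x hx hex
                rw [insI_big e (S ++ (l0 :: lt)) hbigSL, pop_negRev]
                rw [show insI e (lt ++ R) = lt ++ insI e R from
                  insI_append_lt e lt R (fun x hx => hbigL x (List.mem_cons_of_mem _ hx))]
                have pwSl0 : (S ++ [l0]).Pairwise (· ≤ ·) := by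
                  refine List.pairwise_append.mpr ⟨pwS, List.pairwise_singleton _ _, ?_⟩
                  intro x hx y hy
                  rcases List.mem_singleton.mp hy with rfl
                  exact hSle x hx
                have H := ih hrest' (S ++ [l0]) lt (insI e R) (kA - 1) (ans + 1) ?_ ?_ (by omega)
                  (by simp [length_insI] at hkR ⊢; omega) (by simp at hLeq ⊢; omega)
                  (by intro h; exfalso; simp at hLeq h; omega) ?_ ?_
                · simp only [List.append_assoc, List.singleton_append] at H
                  rw [show (S ++ l0 :: lt).sum + e + -e = (S ++ l0 :: lt).sum by ring]
                  rw [show S.sum + l0 = (S ++ [l0]).sum by simp]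
                  exact H
                · refine List.pairwise_append.mpr ⟨List.pairwise_append.mpr ⟨pwSl0, pwlt, ?_⟩,
                    pw_insI pwR, ?_⟩
                  · intro x hx y hy
                    rcases List.mem_append.mp hx with hx | hx
                    · exact le_trans (hSle x hx) (hl0 y hy)
                    · rcases List.mem_singleton.mp hx with rfl
                      exact hl0 y hy
                  · intro x hx y hy
                    have hxe : x ≤ e := by
                      rcases List.mem_append.mp hx with hx | hx
                      · rcases List.mem_append.mp hx with hx | hx
                        · exact le_of_lt (lt_of_not_ge (fun hc => hbigSL x (by simp [hx]) hc))
                        · rcases List.mem_singleton.mp hx with rfl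
                          exact le_of_lt (lt_of_not_ge (fun hc => hel0 hc))
                      · exact le_of_lt (lt_of_not_ge (fun hc => hbigL x (List.mem_cons_of_mem _ hx) hc))
                    rcases mem_insI.mp hy with rfl | hy
                    · exact hxe
                    · rcases List.mem_append.mp hx with hx | hx
                      · rcases List.mem_append.mp hx with hx | hx
                        · exact crossSLR x (by simp [hx]) y hy
                        · rcases List.mem_singleton.mp hx with rfl
                          exact crossLR x (by simp) y hy
                      · exact crossLR x (by simp [hx]) y hy
                · intro x hx
                  simp only [List.mem_append, mem_insI, List.mem_cons, List.mem_singleton,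
                    List.not_mem_nil, or_false] at hx
                  rcases hx with ((hx | rfl) | hx) | rfl | hx
                  · exact hpos x (by simp [hx])
                  · exact hpos x (by simp)
                  · exact hpos x (by simp [hx])
                  · exact he0
                  · exact hpos x (by simp [hx])
                · simp at htot' ⊢; omega
                · intro r0 rs hr
                  cases R with
                  | nil =>
                    rw [show insI e ([] : List Int) = [e] from rfl] at hr
                    obtain ⟨h1, rfl⟩ := List.cons.injEq .. |>.mp hr
                    subst h1
                    simp at hov ⊢; omega
                  | cons r0' rs' =>
                    by_cases her : e ≤ r0'
                    · rw [show insI e (r0'::rs') = e :: r0' :: rs' from if_pos her] at hr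
                      obtain ⟨h1, rfl⟩ := List.cons.injEq .. |>.mp hr
                      subst h1
                      simp at hov ⊢; omega
                    · rw [show insI e (r0'::rs') = r0' :: insI e rs' from if_neg her] at hr
                      obtain ⟨h1, rfl⟩ := List.cons.injEq .. |>.mp hr
                      subst h1
                      have := h6 r0' rs' rfl
                      simp at this ⊢; omega
              · -- some kept wave is at least e: the largest kept wave lN is removed
                rcases List.eq_nil_or_concat' lt with rfl | ⟨mid, lN, rfl⟩
                · exfalso
                  push_neg at hbigL
                  obtain ⟨z, hz, hez⟩ := hbigL
                  rcases List.mem_singleton.mp hz with rfl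
                  exact hel0 hez
                · have hmidN : ∀ x ∈ l0 :: mid, x ≤ lN := by
                    intro x hx
                    rcases List.mem_cons.mp hx with hx | hx
                    · rw [hx]; exact hl0 lN (by simp)
                    · exact (List.pairwise_append.mp pwlt).2.2 x hx lN (by simp)
                  have helN : e ≤ lN := by
                    push_neg at hbigL
                    obtain ⟨z, hz, hez⟩ := hbigL
                    rcases List.mem_cons.mp hz with hz | hz
                    · rw [hz] at hez; exact le_trans hez (hl0 lN (by simp))
                    · rcases List.mem_append.mp hz with hz | hz
                      · exact le_trans hez ((List.pairwise_append.mp pwlt).2.2 z hz lN (by simp))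
                      · rcases List.mem_singleton.mp hz with rfl
                        exact hez
                  have pwSm : (S ++ l0 :: mid).Pairwise (· ≤ ·) := by
                    refine hpwSL.sublist ?_
                    exact ((List.sublist_append_left mid [lN]).cons₂ l0).append_left S
                  have pwSl0 : (S ++ [l0]).Pairwise (· ≤ ·) := by
                    refine List.pairwise_append.mpr ⟨pwS, List.pairwise_singleton _ _, ?_⟩
                    intro x hx y hy
                    rcases List.mem_singleton.mp hy with rfl
                    exact hSle x hx
                  have hkept : insI e (S ++ l0 :: mid) = (S ++ [l0]) ++ insI e mid := by
                    refine sorted_eqI (pw_insI pwSm) ?_ ?_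
                    · refine List.pairwise_append.mpr ⟨pwSl0, pw_insI (List.pairwise_append.mp pwlt).1, ?_⟩
                      intro x hx y hy
                      have hxl0 : x ≤ l0 := by
                        rcases List.mem_append.mp hx with hx | hx
                        · exact hSle x hx
                        · rcases List.mem_singleton.mp hx with rfl; exact le_refl _
                      rcases mem_insI.mp hy with rfl | hy
                      · exact le_trans hxl0 (le_of_lt (lt_of_not_ge hel0))
                      · exact le_trans hxl0 (hl0 y (by simp [hy]))
                    · have hp := perm_ins_mid e (S ++ [l0]) mid
                      simpa using hp
                  rw [show S ++ l0 :: (mid ++ [lN]) = (S ++ l0 :: mid) ++ [lN] by simp]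
                  rw [show insI e ((S ++ l0 :: mid) ++ [lN]) = insI e (S ++ l0 :: mid) ++ [lN] from
                    insI_append_ge e _ [lN] (by simpa using helN), pop_negRev]
                  rw [hkept]
                  have heR2 : ∀ x ∈ [lN] ++ R, e ≤ x := by
                    intro x hx
                    rcases List.mem_append.mp hx with hx | hx
                    · rcases List.mem_singleton.mp hx with rfl; exact helN
                    · exact le_trans helN (crossLR lN (by simp) x hx)
                  rw [show insI e ((mid ++ [lN]) ++ R) = insI e mid ++ (lN :: R) by
                    rw [List.append_assoc]
                    rw [insI_append_ge e mid ([lN] ++ R) heR2]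
                    simp]
                  have H := ih hrest' (S ++ [l0]) (insI e mid) (lN :: R) (kA - 1) (ans + 1) ?_ ?_ (by omega)
                    (by simp at hkR ⊢; omega) (by simp [length_insI] at hLeq ⊢; omega)
                    (by intro h; exfalso; simp [length_insI] at h hLeq; omega) ?_ ?_
                  · rw [show ((S ++ l0 :: mid) ++ [lN]).sum + e + -lN = ((S ++ [l0]) ++ insI e mid).sum by
                      simp [sum_insI]; ring]
                    rw [show S.sum + l0 = (S ++ [l0]).sum by simp]
                    exact H
                  · refine List.pairwise_append.mpr ⟨List.pairwise_append.mpr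
                      ⟨pwSl0, pw_insI (List.pairwise_append.mp pwlt).1, ?_⟩, ?_, ?_⟩
                    · intro x hx y hy
                      have hxl0 : x ≤ l0 := by
                        rcases List.mem_append.mp hx with hx | hx
                        · exact hSle x hx
                        · rcases List.mem_singleton.mp hx with rfl; exact le_refl _
                      rcases mem_insI.mp hy with rfl | hy
                      · exact le_trans hxl0 (le_of_lt (lt_of_not_ge hel0))
                      · exact le_trans hxl0 (hl0 y (by simp [hy]))
                    · refine List.pairwise_cons.mpr ⟨fun y hy => crossLR lN (by simp) y hy, pwR⟩
                    · intro x hx y hy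
                      have hylN : lN ≤ y ∨ y = lN := by
                        rcases List.mem_cons.mp hy with hy | hy
                        · exact Or.inr hy
                        · exact Or.inl (crossLR lN (by simp) y hy)
                      have hxlN : x ≤ lN := by
                        rcases List.mem_append.mp hx with hx | hx
                        · rcases List.mem_append.mp hx with hx | hx
                          · exact le_trans (hSle x hx) (hl0 lN (by simp))
                          · rcases List.mem_singleton.mp hx with rfl
                            exact hl0 lN (by simp)
                        · rcases mem_insI.mp hx with rfl | hx
                          · exact helN
                          · exact (List.pairwise_append.mp pwlt).2.2 x hx lN (by simp)
                      rcases hylN with hylN | rfl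
                      · exact le_trans hxlN hylN
                      · exact hxlN
                  · intro x hx
                    rcases List.mem_append.mp hx with hx | hx
                    · rcases List.mem_append.mp hx with hx | hx
                      · rcases List.mem_append.mp hx with hx | hx
                        · exact hpos x (by simp [hx])
                        · rcases List.mem_singleton.mp hx with rfl
                          exact hpos x (by simp)
                      · rcases mem_insI.mp hx with rfl | hx
                        · exact he0
                        · apply hpos x
                          simp only [List.mem_append, List.mem_cons]
                          tauto
                    · rcases List.mem_cons.mp hx with hx | hx
                      · apply hpos x
                        simp only [List.mem_append, List.mem_cons, List.mem_singleton]
                        tauto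
                      · exact hpos x (by simp [hx])
                  · simp [sum_insI, List.sum_append] at htot' ⊢; omega
                  · intro r0 rs hr
                    obtain ⟨h1, rfl⟩ := List.cons.injEq .. |>.mp hr
                    subst h1
                    simp [sum_insI, List.sum_append] at hov ⊢; omega
    · rw [if_neg hov]
      obtain ⟨pwSL', pwR, crossSLR⟩ := List.pairwise_append.mp hpw
      obtain ⟨pwS, pwL, crossS⟩ := List.pairwise_append.mp pwSL'
      have crossLR : ∀ x ∈ L, ∀ y ∈ R, x ≤ y := fun x hx y hy =>
        crossSLR x (by simp [hx]) y hy
      have htotSL : S.sum + L.sum ≤ n := by simpa [List.sum_append] using htot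
      have heR : ∀ x ∈ R, e ≤ x := by
        cases R with
        | nil => intro x hx; simp at hx
        | cons r0 rs =>
          intro x hx
          have h1 := h6 r0 rs rfl
          simp [List.sum_append] at h1 hov
          have her0 : e ≤ r0 := by omega
          rcases List.mem_cons.mp hx with hx | hx
          · rw [hx]; exact her0
          · exact le_trans her0 ((List.pairwise_cons.mp pwR).1 x hx)
      by_cases hLk : (L.length : Int) < kA
      · -- free slots remain: B does not evict, nothing is paid
        have hS : S = [] := hP7 hLk
        subst hS
        simp only [List.nil_append] at *
        have hcond : ¬ (((insI e (L ++ R)).length : Int) > k) := by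
          simp [length_insI]; omega
        rw [if_neg hcond]
        rw [if_neg (by simp; omega : ¬ (List.sum ([] : List Int) > n))]
        rw [show insI e (L ++ R) = insI e L ++ R from insI_append_ge e L R heR]
        have H := ih hrest' [] (insI e L) R kA (ans + 1) ?_ ?_ hkA hkR ?_ (by simp) ?_ ?_
        · simp only [List.nil_append] at H
          rw [show L.sum + e = (insI e L).sum by rw [sum_insI]; ring]
          exact H
        · simp only [List.nil_append]
          refine List.pairwise_append.mpr ⟨pw_insI pwL, pwR, ?_⟩
          intro x hx y hy
          rcases mem_insI.mp hx with rfl | hx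
          · exact heR y hy
          · exact crossLR x hx y hy
        · intro x hx
          simp only [List.nil_append, List.mem_append, mem_insI] at hx
          rcases hx with (rfl | hx) | hx
          · exact he0
          · exact hpos x (by simp [hx])
          · exact hpos x (by simp [hx])
        · simp [length_insI]; omega
        · simp [sum_insI]; omega
        · intro r0 rs hr
          have := h6 r0 rs hr
          simp [sum_insI] at this ⊢; omega
      · -- B evicts and pays the smallest free wave
        have hLeq : (L.length : Int) = kA := le_antisymm hL (not_lt.mp hLk)
        have hcond : ((insI e (L ++ R)).length : Int) > k := by
          simp [length_insI]; omega
        rw [if_pos hcond]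
        cases L with
        | nil =>
          -- k = 0: the new wave e is evicted and paid at once
          have hfree : insI e (([] : List Int) ++ R) = e :: R := by
            cases R with
            | nil => rfl
            | cons r0 rs =>
              simp only [List.nil_append]
              exact if_pos (heR r0 (by simp))
          rw [hfree]
          simp only [heapPop_cons]
          rw [if_neg (by simp [List.sum_append] at hov ⊢; omega : ¬ (S.sum + e > n))]
          rw [show S ++ ([] : List Int) = S by simp]
          rw [show S.sum + e = (insI e S).sum by rw [sum_insI]; ring]
          have H := ih hrest' (insI e S) [] R kA (ans + 1) ?_ ?_ hkA hkR (by simp; omega)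
            (by intro h; exfalso; simp at h hLeq; omega) ?_ ?_
          · simp only [List.append_nil, List.nil_append] at H
            exact H
          · simp only [List.append_nil, List.nil_append]
            refine List.pairwise_append.mpr ⟨pw_insI pwS, pwR, ?_⟩
            intro x hx y hy
            rcases mem_insI.mp hx with rfl | hx
            · exact heR y hy
            · exact crossSLR x (by simp [hx]) y hy
          · intro x hx
            simp only [List.append_nil, List.nil_append, List.mem_append, mem_insI] at hx
            rcases hx with (rfl | hx) | hx
            · exact he0
            · exact hpos x (by simp [hx])
            · exact hpos x (by simp [hx])
          · simp [sum_insI, List.sum_append] at hov ⊢; omega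
          · intro r0 rs hr
            have := h6 r0 rs hr
            simp [sum_insI, List.sum_append] at this ⊢; omega
        | cons l0 lt =>
          obtain ⟨hl0, pwlt⟩ := List.pairwise_cons.mp pwL
          have hSle : ∀ x ∈ S, x ≤ l0 := fun x hx => crossS x hx l0 (by simp)
          have hsumlt : 0 ≤ lt.sum := sum_nonnegI (fun x hx => hpos x (by simp [hx]))
          have hl00 : 0 ≤ l0 := hpos l0 (by simp)
          have htot' : S.sum + (l0 + lt.sum) ≤ n := by
            simpa [List.sum_append] using htot
          have pwSl0 : (S ++ [l0]).Pairwise (· ≤ ·) := by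
            refine List.pairwise_append.mpr ⟨pwS, List.pairwise_singleton _ _, ?_⟩
            intro x hx y hy
            rcases List.mem_singleton.mp hy with rfl
            exact hSle x hx
          by_cases hel0 : e ≤ l0
          · -- the new wave e itself is evicted and paid
            have hfree : insI e ((l0 :: lt) ++ R) = e :: (l0 :: (lt ++ R)) := by
              simp [insI, hel0]
            rw [hfree]
            simp only [heapPop_cons]
            rw [if_neg (by simp [List.sum_append] at hov ⊢; omega : ¬ (S.sum + e > n))]
            rw [show insI e (S ++ l0 :: lt) = insI e S ++ (l0 :: lt) from
              insI_append_ge e S (l0 :: lt) (by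
                intro x hx
                rcases List.mem_cons.mp hx with hx | hx
                · rw [hx]; exact hel0
                · exact le_trans hel0 (hl0 x hx))]
            rw [show (S ++ l0 :: lt).sum + e = (insI e S ++ (l0 :: lt)).sum by
              simp [sum_insI, List.sum_append]; ring]
            rw [show l0 :: (lt ++ R) = (l0 :: lt) ++ R by simp]
            rw [show S.sum + e = (insI e S).sum by rw [sum_insI]; ring]
            have H := ih hrest' (insI e S) (l0 :: lt) R kA (ans + 1) ?_ ?_ hkA hkR
              (by simpa using hLeq.le) (by intro h; exfalso; simp at h hLeq; omega) ?_ ?_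
            · exact H
            · refine List.pairwise_append.mpr ⟨List.pairwise_append.mpr ⟨pw_insI pwS, pwL, ?_⟩, pwR, ?_⟩
              · intro x hx y hy
                rcases mem_insI.mp hx with rfl | hx
                · rcases List.mem_cons.mp hy with hy | hy
                  · rw [hy]; exact hel0
                  · exact le_trans hel0 (hl0 y hy)
                · exact crossS x hx y hy
              · intro x hx y hy
                rcases List.mem_append.mp hx with hx | hx
                · rcases mem_insI.mp hx with rfl | hx
                  · exact heR y hy
                  · exact crossSLR x (by simp [hx]) y hy
                · exact crossLR x hx y hy
            · intro x hx
              rcases List.mem_append.mp hx with hx | hx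
              · rcases List.mem_append.mp hx with hx | hx
                · rcases mem_insI.mp hx with rfl | hx
                  · exact he0
                  · exact hpos x (by simp [hx])
                · apply hpos x
                  simp only [List.mem_append, List.mem_cons] at hx ⊢
                  tauto
              · exact hpos x (by simp [hx])
            · simp [sum_insI, List.sum_append] at hov ⊢; omega
            · intro r0 rs hr
              have := h6 r0 rs hr
              simp [sum_insI, List.sum_append] at this ⊢; omega
          · -- the head free wave l0 is evicted and paid
            have hfree : insI e ((l0 :: lt) ++ R) = l0 :: insI e (lt ++ R) := by
              simp [insI, hel0]
            rw [hfree]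
            simp only [heapPop_cons]
            rw [if_neg (by omega : ¬ (S.sum + l0 > n))]
            rw [show insI e (lt ++ R) = insI e lt ++ R from insI_append_ge e lt R heR]
            have hbigSl0 : ∀ x ∈ S ++ [l0], ¬ e ≤ x := by
              intro x hx hex
              rcases List.mem_append.mp hx with hx | hx
              · exact hel0 (le_trans hex (hSle x hx))
              · rcases List.mem_singleton.mp hx with rfl
                exact hel0 hex
            rw [show insI e (S ++ l0 :: lt) = (S ++ [l0]) ++ insI e lt by
              rw [show S ++ l0 :: lt = (S ++ [l0]) ++ lt by simp]
              exact insI_append_lt e (S ++ [l0]) lt hbigSl0]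
            rw [show (S ++ l0 :: lt).sum + e = ((S ++ [l0]) ++ insI e lt).sum by
              simp [sum_insI, List.sum_append]; ring]
            rw [show S.sum + l0 = (S ++ [l0]).sum by simp]
            have H := ih hrest' (S ++ [l0]) (insI e lt) R kA (ans + 1) ?_ ?_ hkA hkR
              (by simp [length_insI] at hLeq ⊢; omega)
              (by intro h; exfalso; simp [length_insI] at h hLeq; omega) ?_ ?_
            · exact H
            · refine List.pairwise_append.mpr ⟨List.pairwise_append.mpr
                ⟨pwSl0, pw_insI pwlt, ?_⟩, pwR, ?_⟩
              · intro x hx y hy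
                have hxl0 : x ≤ l0 := by
                  rcases List.mem_append.mp hx with hx | hx
                  · exact hSle x hx
                  · rcases List.mem_singleton.mp hx with rfl; exact le_refl _
                rcases mem_insI.mp hy with rfl | hy
                · exact le_trans hxl0 (le_of_lt (lt_of_not_ge hel0))
                · exact le_trans hxl0 (hl0 y hy)
              · intro x hx y hy
                rcases List.mem_append.mp hx with hx | hx
                · rcases List.mem_append.mp hx with hx | hx
                  · exact crossSLR x (by simp [hx]) y hy
                  · rw [List.mem_singleton.mp hx]
                    exact crossLR l0 (by simp) y hy
                · rcases mem_insI.mp hx with rfl | hx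
                  · exact heR y hy
                  · exact crossLR x (by simp [hx]) y hy
            · intro x hx
              rcases List.mem_append.mp hx with hx | hx
              · rcases List.mem_append.mp hx with hx | hx
                · rcases List.mem_append.mp hx with hx | hx
                  · exact hpos x (by simp [hx])
                  · rcases List.mem_singleton.mp hx with rfl
                    exact hpos x (by simp)
                · rcases mem_insI.mp hx with rfl | hx
                  · exact he0
                  · exact hpos x (by simp [hx])
              · exact hpos x (by simp [hx])
            · simp [sum_insI, List.sum_append] at hov ⊢; omega
            · intro r0 rs hr
              have := h6 r0 rs hr
              simp [sum_insI, List.sum_append] at this ⊢; omega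

-- ===== extra agreement regions =====

-- k = 0: both programs pay every wave and die at the first prefix exceeding n
theorem lemD (n : Int) : ∀ (rest : List Int) (heap : List Int) (ans total : Int),
    solutionGo n heap ans total 0 rest = solutionAltGo n 0 [] total ans rest := by
  intro rest
  induction rest with
  | nil => intro heap ans total; simp [solutionGo, solutionAltGo]
  | cons e rest ih =>
    intro heap ans total
    simp only [solutionGo, solutionAltGo]
    rw [show heapPush ([] : List Int) e = [e] from rfl]
    rw [if_pos (by simp : ((([e] : List Int)).length : Int) > 0)]
    simp only [heapPop_cons]
    by_cases hov : total + e > n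
    · simp [hov]
    · rw [if_neg hov, if_neg hov, ih]

-- k < 0: A's budget test k == 0 never fires, so A survives every round
theorem lemNegA (n : Int) : ∀ (rest : List Int) (heap : List Int) (ans total kA : Int),
    kA < 0 →
    solutionGo n heap ans total kA rest = ans + (rest.length : Int) := by
  intro rest
  induction rest with
  | nil => intro heap ans total kA _; simp [solutionGo]
  | cons e rest ih =>
    intro heap ans total kA hkA
    simp only [solutionGo]
    by_cases hov : total + e > n
    · rw [if_pos hov, if_neg (by omega : ¬ (kA = 0)), ih _ _ _ _ (by omega)]
      simp; omega
    · rw [if_neg hov, ih _ _ _ _ hkA]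
      simp; omega

-- k < 0 and every prefix fits in n: B evicts each wave at once and pays the prefixes
theorem lemNegB (n k : Int) (hk : k < 0) : ∀ (rest : List Int) (paid i : Int),
    (∀ p : ℕ, paid + ((rest.take p).sum) ≤ n) →
    solutionAltGo n k [] paid i rest = i + (rest.length : Int) := by
  intro rest
  induction rest with
  | nil => intro paid i _; simp [solutionAltGo]
  | cons e rest ih =>
    intro paid i h
    simp only [solutionAltGo]
    rw [show heapPush ([] : List Int) e = [e] from rfl]
    rw [if_pos (by simp; omega : ((([e] : List Int)).length : Int) > k)]
    simp only [heapPop_cons]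
    rw [if_neg (by have := h 1; simp at this; omega)]
    rw [ih (paid + e) (i + 1) (by intro p; have := h (p + 1); simp at this ⊢; omega)]
    simp; omega

-- prefix sums never exceed n: A never needs a refund and survives every round
theorem lemC_A (n : Int) : ∀ (rest : List Int) (heap : List Int) (ans total kA : Int),
    (∀ p : ℕ, total + ((rest.take p).sum) ≤ n) →
    solutionGo n heap ans total kA rest = ans + (rest.length : Int) := by
  intro rest
  induction rest with
  | nil => intro heap ans total kA _; simp [solutionGo]
  | cons e rest ih =>
    intro heap ans total kA h
    simp only [solutionGo]
    rw [if_neg (by have := h 1; simp at this; omega)]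
    rw [ih _ _ _ _ (by intro p; have := h (p + 1); simpa [add_assoc] using this)]
    simp; omega

-- number of strictly positive entries, as an Int
def posCnt (xs : List Int) : Int := (xs.countP (fun x => decide (0 < x)) : Int)

theorem posCnt_nonneg (xs : List Int) : 0 ≤ posCnt xs := Int.natCast_nonneg _

theorem posCnt_cons (e : Int) (xs : List Int) :
    posCnt (e :: xs) = posCnt xs + (if 0 < e then 1 else 0) := by
  simp only [posCnt, List.countP_cons]
  by_cases h : 0 < e <;> simp [h]

theorem posCnt_insI (e : Int) (xs : List Int) :
    posCnt (insI e xs) = posCnt xs + (if 0 < e then 1 else 0) := by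
  have h := (perm_insI e xs).countP_eq (fun x => decide (0 < x))
  simp only [posCnt, h]
  exact posCnt_cons e xs

theorem posCnt_append (xs ys : List Int) :
    posCnt (xs ++ ys) = posCnt xs + posCnt ys := by
  simp [posCnt, List.countP_append]

theorem posCnt_eq_len (xs : List Int) (h : ∀ x ∈ xs, 0 < x) :
    posCnt xs = (xs.length : Int) := by
  simp only [posCnt]
  congr 1
  exact List.countP_eq_length.mpr (fun x hx => by simpa using h x hx)

theorem sum_nonposI {l : List Int} (h : ∀ x ∈ l, x ≤ 0) : l.sum ≤ 0 := by
  induction l with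
  | nil => simp
  | cons a t ih =>
    have := h a (by simp)
    have := ih (fun x hx => h x (by simp [hx]))
    simp only [List.sum_cons]; omega

-- at most k strictly positive waves (0 ≤ n): A's refunds always hit a positive wave,
-- so its budget never runs dry and it survives every round
theorem lemP_A (n : Int) (hn : 0 ≤ n) : ∀ (rest K : List Int) (ans kA : Int),
    K.Pairwise (· ≤ ·) →
    posCnt K + posCnt rest ≤ kA →
    solutionGo n (negRev K) ans K.sum kA rest = ans + (rest.length : Int) := by
  intro rest
  induction rest with
  | nil => intro K ans kA _ _; simp [solutionGo]
  | cons e rest ih =>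
    intro K ans kA pwK hcnt
    simp only [solutionGo]
    rw [push_negRev e K pwK]
    rw [posCnt_cons] at hcnt
    by_cases hov : K.sum + e > n
    · rw [if_pos hov]
      rcases List.eq_nil_or_concat' (insI e K) with hnil | ⟨W, M, hWM⟩
      · exact absurd (congrArg List.length hnil) (by simp [length_insI])
      have pwK2 : (insI e K).Pairwise (· ≤ ·) := pw_insI pwK
      have hsum2 : (insI e K).sum = e + K.sum := sum_insI e K
      have hlast : ∀ x ∈ insI e K, x ≤ M := by
        intro x hx
        rw [hWM] at hx pwK2
        rcases List.mem_append.mp hx with hx | hx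
        · exact (List.pairwise_append.mp pwK2).2.2 x hx M (by simp)
        · rw [List.mem_singleton.mp hx]
      have hMpos : 0 < M := by
        by_contra hM
        have : (insI e K).sum ≤ 0 := sum_nonposI (fun x hx => le_trans (hlast x hx) (by omega))
        omega
      have hcnt2 : posCnt (insI e K) = posCnt W + 1 := by
        rw [hWM, posCnt_append]
        simp [posCnt, hMpos]
      have hcnte : posCnt (insI e K) = posCnt K + (if 0 < e then 1 else 0) := posCnt_insI e K
      have hRnn := posCnt_nonneg rest
      have hWnn := posCnt_nonneg W
      have hKnn := posCnt_nonneg K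
      rw [if_neg (by split_ifs at hcnt <;> omega : ¬ (kA = 0))]
      rw [hWM, pop_negRev]
      rw [show K.sum + e + -M = W.sum by
        have := congrArg List.sum hWM
        simp [sum_insI, List.sum_append] at this
        omega]
      rw [ih W (ans + 1) (kA - 1) ?_ ?_]
      · simp; omega
      · have := pw_insI (e := e) pwK
        rw [hWM] at this
        exact (List.pairwise_append.mp this).1
      · split_ifs at hcnt <;> omega
    · rw [if_neg hov]
      rw [show K.sum + e = (insI e K).sum by rw [sum_insI]; ring]
      rw [ih (insI e K) (ans + 1) kA (pw_insI pwK) ?_]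
      · simp; omega
      · rw [posCnt_insI]
        have := posCnt_nonneg rest
        split_ifs at hcnt ⊢ <;> omega

-- at most k strictly positive waves (0 ≤ n): B's evictions always pop a nonpositive
-- wave, so the paid total never exceeds n and it survives every round
theorem lemP_B (n k : Int) (hn : 0 ≤ n) : ∀ (rest L : List Int) (paid i : Int),
    L.Pairwise (· ≤ ·) →
    paid ≤ 0 →
    posCnt L + posCnt rest ≤ k →
    (L.length : Int) ≤ k →
    solutionAltGo n k L paid i rest = i + (rest.length : Int) := by
  intro rest
  induction rest with
  | nil => intro L paid i _ _ _ _; simp [solutionAltGo]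
  | cons e rest ih =>
    intro L paid i pwL hpaid hcnt hLk
    simp only [solutionAltGo]
    rw [heapPush_insI]
    rw [posCnt_cons] at hcnt
    have hRnn := posCnt_nonneg rest
    have hLnn := posCnt_nonneg L
    by_cases hc : ((insI e L).length : Int) > k
    · rw [if_pos hc]
      rw [length_insI] at hc
      push_cast at hc
      have hLek : (L.length : Int) = k := by omega
      cases L with
      | nil =>
        -- k = 0 and e must be nonpositive
        have hk0 : k = 0 := by simpa using hLek.symm
        have he : ¬ (0 < e) := by
          intro hpos
          simp [hpos, posCnt] at hcnt
          omega
        rw [show insI e ([] : List Int) = [e] from rfl]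
        simp only [heapPop_cons]
        rw [if_neg (by omega : ¬ (paid + e > n))]
        rw [ih [] (paid + e) (i + 1) List.Pairwise.nil (by omega) ?_ ?_]
        · simp; omega
        · simp [posCnt] at hcnt ⊢; omega
        · simp; omega
      | cons l0 lt =>
        have hallpos : 0 < l0 → posCnt (l0 :: lt) = ((l0 :: lt).length : Int) := by
          intro hl0
          refine posCnt_eq_len _ ?_
          intro x hx
          rcases List.mem_cons.mp hx with hx | hx
          · omega
          · exact lt_of_lt_of_le hl0 ((List.pairwise_cons.mp pwL).1 x hx)
        by_cases hel : e ≤ l0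
        · -- the pushed wave e is evicted; it must be nonpositive
          have henp : e ≤ 0 := by
            by_contra hep
            have h1 := hallpos (by omega)
            simp only [List.length_cons] at h1
            rw [if_pos (by omega : (0:Int) < e)] at hcnt
            simp at hLek
            omega
          rw [show insI e (l0 :: lt) = e :: l0 :: lt from if_pos hel]
          simp only [heapPop_cons]
          rw [if_neg (by omega : ¬ (paid + e > n))]
          rw [ih (l0 :: lt) (paid + e) (i + 1) pwL (by omega) ?_ (by omega)]
          · simp; omega
          · rw [if_neg (by omega : ¬ ((0:Int) < e))] at hcnt
            omega
        · -- the head l0 is evicted; it must be nonpositive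
          have hl0np : l0 ≤ 0 := by
            by_contra hl0p
            have h1 := hallpos (by omega)
            simp only [List.length_cons] at h1
            rw [if_pos (by omega : (0:Int) < e)] at hcnt
            simp at hLek
            omega
          rw [show insI e (l0 :: lt) = l0 :: insI e lt from if_neg hel]
          simp only [heapPop_cons]
          rw [if_neg (by omega : ¬ (paid + l0 > n))]
          rw [ih (insI e lt) (paid + l0) (i + 1) (pw_insI (List.pairwise_cons.mp pwL).2)
            (by omega) ?_ ?_]
          · simp; omega
          · rw [posCnt_insI]
            rw [posCnt_cons] at hcnt
            rw [if_neg (by omega : ¬ ((0:Int) < l0))] at hcnt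
            split_ifs at hcnt ⊢ <;> omega
          · simp [length_insI] at hLek ⊢; omega
    · rw [if_neg hc]
      rw [if_neg (by omega : ¬ (paid > n))]
      rw [length_insI] at hc
      push_cast at hc
      rw [ih (insI e L) paid (i + 1) (pw_insI pwL) hpaid ?_ (by simp [length_insI]; omega)]
      · simp; omega
      · rw [posCnt_insI]
        split_ifs at hcnt ⊢ <;> omega

-- every prefix of the waves fits in n: A pays everything and never overflows,
-- B's paid total can likewise never exceed n
theorem lemC_B (n k : Int) (hn : 0 ≤ n) (hk : 0 ≤ k) : ∀ (rest L : List Int) (paid i : Int),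
    L.Pairwise (· ≤ ·) →
    (∀ p : ℕ, (paid + L.sum) + ((rest.take p).sum) ≤ n) →
    ((L.length : Int) ≤ k) →
    (paid ≤ 0 ∨ 0 ≤ L.sum) →
    (paid = 0 ∨ (L.length : Int) = k) →
    solutionAltGo n k L paid i rest = i + (rest.length : Int) := by
  intro rest
  induction rest with
  | nil => intro L paid i _ _ _ _ _; simp [solutionAltGo]
  | cons e rest ih =>
    intro L paid i pwL h hLk hdisj hpk
    have hpaidn : paid ≤ n := by
      rcases hdisj with hd | hd
      · omega
      · have := h 0; simp at this; omega
    simp only [solutionAltGo]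
    rw [heapPush_insI]
    by_cases hc : ((insI e L).length : Int) > k
    · rw [if_pos hc]
      rw [length_insI] at hc
      push_cast at hc
      have hLek : (L.length : Int) = k := by omega
      cases L with
      | nil =>
        rw [show insI e ([] : List Int) = [e] from rfl]
        simp only [heapPop_cons]
        rw [if_neg (by have := h 1; simp at this; omega)]
        rw [ih [] (paid + e) (i + 1) List.Pairwise.nil ?_ (by omega) (by simp)
          (Or.inr (by simpa using hLek))]
        · simp; omega
        · intro p
          have := h (p + 1)
          simp at this ⊢
          omega
      | cons l0 lt =>
        have hltpos : 0 < l0 → 0 ≤ (l0 :: lt).sum := by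
          intro hl0
          refine sum_nonnegI ?_
          intro x hx
          rcases List.mem_cons.mp hx with hx | hx
          · omega
          · exact le_of_lt (lt_of_lt_of_le hl0 ((List.pairwise_cons.mp pwL).1 x hx))
        by_cases hel : e ≤ l0
        · -- e is evicted and paid
          rw [show insI e (l0 :: lt) = e :: l0 :: lt from if_pos hel]
          simp only [heapPop_cons]
          have hdeath : ¬ (paid + e > n) := by
            by_cases hep : 0 < e
            · have hs := hltpos (by omega)
              have h1 := h 1
              simp at h1 hs
              omega
            · omega
          rw [if_neg hdeath]
          rw [ih (l0 :: lt) (paid + e) (i + 1) pwL ?_ (by omega) ?_ (Or.inr hLek)]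
          · simp; omega
          · intro p
            have := h (p + 1)
            simp at this ⊢
            omega
          · by_cases hep : 0 < e
            · exact Or.inr (hltpos (by omega))
            · rcases hdisj with hd | hd
              · exact Or.inl (by omega)
              · exact Or.inr hd
        · -- l0 is evicted and paid
          rw [show insI e (l0 :: lt) = l0 :: insI e lt from if_neg hel]
          simp only [heapPop_cons]
          obtain ⟨hl0lt, pwlt⟩ := List.pairwise_cons.mp pwL
          have hltnn : 0 < l0 → 0 ≤ lt.sum := by
            intro hl0
            refine sum_nonnegI ?_
            intro x hx
            exact le_of_lt (lt_of_lt_of_le hl0 (hl0lt x hx))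
          have hdeath : ¬ (paid + l0 > n) := by
            by_cases hl0p : 0 < l0
            · have h0 := h 0
              have := hltnn hl0p
              simp at h0
              omega
            · omega
          rw [if_neg hdeath]
          rw [ih (insI e lt) (paid + l0) (i + 1) (pw_insI pwlt) ?_ ?_ ?_ ?_]
          · simp; omega
          · intro p
            have := h (p + 1)
            simp [sum_insI] at this ⊢
            omega
          · simp [length_insI] at hLek ⊢; omega
          · by_cases hl0p : 0 < l0
            · refine Or.inr ?_
              have := hltnn hl0p
              rw [sum_insI]
              omega
            · rcases hdisj with hd | hd
              · exact Or.inl (by omega)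
              · refine Or.inr ?_
                rw [sum_insI]
                simp at hd
                omega
          · exact Or.inr (by simp [length_insI] at hLek ⊢; omega)
    · -- no eviction: nothing has ever been paid
      rw [if_neg hc]
      rw [if_neg (by omega : ¬ (paid > n))]
      rw [length_insI] at hc
      push_cast at hc
      have hpaid0 : paid = 0 := by
        rcases hpk with hp | hp
        · exact hp
        · omega
      rw [ih (insI e L) paid (i + 1) (pw_insI pwL) ?_ (by simp [length_insI]; omega)
        (Or.inl (by omega)) (Or.inl hpaid0)]
      · simp; omega
      · intro p
        have := h (p + 1)
        simp [sum_insI] at this ⊢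
        omega

-- ===== VERDICT (by name: the statement is the Claim_ definition above) =====
theorem solution_spec : Claim_equal_solution := by
  intro n k enemy _hd hpre
  rcases hpre with hnil | hk0 | ⟨hkneg, hprefN⟩ | ⟨hn, hk, hcase⟩
  · subst hnil
    simp [Spec_solution, solution, solution_alt, solutionGo, solutionAltGo]
  · subst hk0
    simpa [Spec_solution, solution, solution_alt] using lemD n enemy [] 0 0
  · have hpre' : ∀ p : ℕ, (0:Int) + ((enemy.take p).sum) ≤ n := by
      intro p
      by_cases hp : p ≤ enemy.length
      · simpa using hprefN p (by simp [List.mem_range]; omega)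
      · have h1 := hprefN enemy.length (by simp)
        rw [List.take_of_length_le (by omega)]
        simpa using h1
    have hA := lemNegA n enemy [] 0 0 k hkneg
    have hB := lemNegB n k hkneg enemy 0 0 (by intro p; simpa using hpre' p)
    simp only [Spec_solution, solution, solution_alt]
    rw [hA, hB]
  rcases hcase with hnn | hcnt | hpref
  · have := key_lemma n k hn enemy hnn [] [] [] k 0 (by simp) (by simp) hk (by simp) hk
      (by simp) (by simpa using hn) (by simp)
    simpa [Spec_solution, solution, solution_alt, negRev] using this
  · have hA := lemP_A n hn enemy [] 0 k List.Pairwise.nil (by simpa [posCnt] using hcnt)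
    have hB := lemP_B n k hn enemy [] 0 0 List.Pairwise.nil le_rfl
      (by simpa [posCnt] using hcnt) (by simpa using hk)
    simp only [negRev, List.map_nil, List.reverse_nil, List.sum_nil] at hA
    simp only [Spec_solution, solution, solution_alt]
    rw [hA, hB]
  · have hpre' : ∀ p : ℕ, (0:Int) + ((enemy.take p).sum) ≤ n := by
      intro p
      by_cases hp : p ≤ enemy.length
      · simpa using hpref p (by simp [List.mem_range]; omega)
      · have h1 := hpref enemy.length (by simp)
        rw [List.take_of_length_le (by omega)]
        simpa using h1
    have hA := lemC_A n enemy [] 0 0 k hpre'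
    have hB := lemC_B n k hn hk enemy [] 0 0 List.Pairwise.nil
      (by intro p; simpa using hpre' p) (by simpa using hk) (Or.inl le_rfl) (Or.inl rfl)
    simp only [Spec_solution, solution, solution_alt]
    rw [hA, hB]
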